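-- pv_equiv track=rewrite | github.com/msabramo/tox | tox/_config.py | _split_env
-- ===== SOURCE A (Python) =====
-- def _split_env(env):
--     """if handed a list, action="append" was used for -e """
--     envlist = []
--     if not isinstance(env, list):
--         env = [env]
--     for to_split in env:
--         for single_env in to_split.split(","):
--             # "remove True or", if not allowing multiple same runs, update tests
--             if True or single_env not in envlist:
--                 envlist.append(single_env)
--     return envlist
-- ===== SOURCE B (Python) =====
-- def _split_env(env):
--     """if handed a list, action="append" was used for -e """
--     if not isinstance(env, list):
--         env = [env]
--     if not env:
--         return []
--     return ",".join(env).split(",")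
-- ===== Notes on version B (the rewrite author's own statement) =====
-- stated objective: simpler
-- what changed: Replaces the nested per-element split-and-append loops by a single join of the whole list followed by one split on commas (with an empty-list guard, since joining nothing would split to ['']).
import Mathlib
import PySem

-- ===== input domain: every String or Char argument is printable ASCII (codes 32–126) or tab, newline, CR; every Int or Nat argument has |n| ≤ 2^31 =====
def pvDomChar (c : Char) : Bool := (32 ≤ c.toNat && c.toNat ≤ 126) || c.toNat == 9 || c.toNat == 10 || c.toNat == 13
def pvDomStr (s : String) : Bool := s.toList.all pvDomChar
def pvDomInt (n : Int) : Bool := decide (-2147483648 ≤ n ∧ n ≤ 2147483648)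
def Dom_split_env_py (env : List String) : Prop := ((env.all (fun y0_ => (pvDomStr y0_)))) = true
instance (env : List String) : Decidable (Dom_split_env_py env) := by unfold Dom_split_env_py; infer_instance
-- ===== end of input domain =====

-- B joins the whole list with "," and splits once (with an empty-list guard) instead of A's
-- nested per-element split-and-append loops; objective: simpler.

-- ===== PORT A =====
-- the `isinstance(env, list)` branch is vacuous under the type convention (env : List String)
def split_env_py (env : List String) : List String :=
  env.foldl (fun envlist to_split =>
    ((PySem.Str.split? to_split ",").getD []).foldl (fun acc single_env =>
      if true || !(acc.contains single_env) then acc ++ [single_env] else acc) envlist) []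

-- ===== PORT B =====
def split_env_py_alt (env : List String) : List String :=
  if env = [] then []
  else (PySem.Str.split? (PySem.Str.join "," env) ",").getD []

-- ===== PRECONDITION & SPEC =====
def Spec_split_env_py (env : List String) (out : List String) : Prop := out = split_env_py_alt env
instance (env : List String) (out : List String) : Decidable (Spec_split_env_py env out) := by unfold Spec_split_env_py; infer_instance

-- ===== CLAIM (what is proved, stated in full; the proofs are below) =====
def Claim_equal_split_env_py : Prop := ∀ (env : List String), Dom_split_env_py env → Spec_split_env_py env (split_env_py env)

-- ===== LEMMAS AND PROOFS =====

-- a simple structural characterisation of splitting on a single comma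
def spl : List Char → List (List Char)
  | [] => [[]]
  | c :: rest => if c = ',' then [] :: spl rest
    else match spl rest with
      | [] => [[c]]
      | h :: t => (c :: h) :: t

def consH (p : List Char) : List (List Char) → List (List Char)
  | [] => [p]
  | h :: t => (p ++ h) :: t

theorem spl_ne_nil (l : List Char) : spl l ≠ [] := by
  cases l with
  | nil => simp [spl]
  | cons c rest =>
    simp only [spl]
    split
    · simp
    · split <;> simp_all

theorem go_eq (fuel : Nat) : ∀ (l cur : List Char) (acc : List (List Char)),
    l.length ≤ fuel →
    PySem.Chars.splitOn.go [','] fuel l cur acc = acc.reverse ++ consH cur.reverse (spl l) := by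
  induction fuel with
  | zero =>
    intro l cur acc h
    have : l = [] := List.eq_nil_of_length_eq_zero (Nat.le_zero.mp h)
    subst this
    simp [PySem.Chars.splitOn.go, spl, consH]
  | succ n ih =>
    intro l cur acc h
    cases l with
    | nil => simp [PySem.Chars.splitOn.go, spl, consH]
    | cons c rest =>
      simp only [PySem.Chars.splitOn.go]
      by_cases hc : c = ','
      · subst hc
        rw [if_pos (by simp)]
        simp only [List.length_cons, List.length_nil, List.drop_succ_cons, List.drop_zero]
        rw [ih rest [] (cur.reverse :: acc) (by simpa using Nat.lt_succ_iff.mp (by simpa using h))]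
        cases hr : spl rest with
        | nil => exact absurd hr (spl_ne_nil rest)
        | cons h t => simp [spl, consH, hr]
      · rw [if_neg (by simp only [List.isPrefixOf, Bool.and_eq_true, beq_iff_eq]; exact fun hh => hc hh.1.symm)]
        rw [ih rest (c :: cur) acc (by simpa using Nat.lt_succ_iff.mp (by simpa using h))]
        simp only [spl, if_neg hc, List.reverse_cons]
        congr 1
        cases hr : spl rest with
        | nil => exact absurd hr (spl_ne_nil rest)
        | cons h t => simp [consH]

theorem splitOn_comma (s : List Char) : PySem.Chars.splitOn s [','] = spl s := by
  unfold PySem.Chars.splitOn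
  rw [go_eq (s.length + 1) s [] [] (Nat.le_succ _)]
  cases hs : spl s with
  | nil => exact absurd hs (spl_ne_nil s)
  | cons h t => simp [consH]

theorem spl_append (a b : List Char) : spl (a ++ ',' :: b) = spl a ++ spl b := by
  induction a with
  | nil =>
    cases hb : spl b with
    | nil => exact absurd hb (spl_ne_nil b)
    | cons h t => simp [spl, hb]
  | cons c a' ih =>
    by_cases hc : c = ','
    · subst hc; simp [spl, ih]
    · simp only [List.cons_append, spl, if_neg hc, ih]
      cases ha : spl a' with
      | nil => exact absurd ha (spl_ne_nil a')
      | cons h t => simp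

theorem spl_join (ps : List (List Char)) (h : ps ≠ []) :
    spl (PySem.Chars.join [','] ps) = ps.flatMap spl := by
  induction ps with
  | nil => simp at h
  | cons p ps ih =>
    cases ps with
    | nil => simp [PySem.Chars.join, List.intercalate, spl]
    | cons q qs =>
      have hj : PySem.Chars.join [','] (p :: q :: qs)
          = p ++ ',' :: PySem.Chars.join [','] (q :: qs) := by
        simp [PySem.Chars.join, List.intercalate]
      rw [hj, spl_append, ih (by simp)]
      simp

-- ===== VERDICT (by name: the statement is the Claim_ definition above) =====
theorem flatten_map_singleton {A B : Type} (l : List A) (f : A → B) :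
    (List.map (fun x => [f x]) l).flatten = List.map f l := by
  induction l <;> simp_all

theorem split_env_py_spec : Claim_equal_split_env_py := by
  intro env _
  unfold Spec_split_env_py split_env_py split_env_py_alt
  have hA : ∀ (s : String) (acc : List String),
      ((PySem.Str.split? s ",").getD []).foldl (fun acc single_env =>
        if true || !(acc.contains single_env) then acc ++ [single_env] else acc) acc
      = acc ++ (spl s.toList).map String.ofList := by
    intro s acc
    simp [PySem.Str.split?, PySem.Chars.split?, splitOn_comma,
      PySem.List.foldl_append_singleton_eq_self, flatten_map_singleton, Function.comp_def]
  cases env with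
  | nil => simp
  | cons e es =>
    rw [if_neg (by simp)]
    have hfold : ∀ (l : List String) (acc : List String),
        l.foldl (fun envlist to_split =>
          ((PySem.Str.split? to_split ",").getD []).foldl (fun acc single_env =>
            if true || !(acc.contains single_env) then acc ++ [single_env] else acc) envlist) acc
        = acc ++ l.flatMap (fun s => (spl s.toList).map String.ofList) := by
      intro l
      induction l with
      | nil => simp
      | cons x xs ih => intro acc; rw [List.foldl_cons, hA, ih]; simp
    rw [hfold]
    simp only [PySem.Str.split?, PySem.Str.join, PySem.Chars.split?,
      String.toList_ofList]
    rw [show (",".toList) = [','] by decide]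
    rw [if_neg (by decide)]
    simp only [Option.getD_some, List.map_cons, splitOn_comma]
    rw [spl_join _ (by simp)]
    simp [List.map_flatMap, List.flatMap_map, Function.comp_def]
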